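-- pv_equiv track=rewrite | github.com/J75057exe/Disabled-Bot | Disabled Bot.py | spastify
-- ===== SOURCE A (Python) =====
-- def spastify(string):
--     first = ""
--     spastified = ""
--     for i, char in enumerate(string):
--         if i % 2 == 0:
--             first += string[i].upper()
--         else:
--             first += string[i]
--
--     str = ""
--     for x in first:
--         if x == " ":
--             spastified += " :wheelchair: "
--         else:
--             spastified += x
--
--     return (spastified)
-- ===== SOURCE B (Python) =====
-- def spastify(string):
--     # Chunk the string into 2-character grams, uppercase the head of each
--     # chunk, join once, then do a single whole-string space replacement.
--     merged = []
--     for j in range(0, len(string), 2):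
--         chunk = string[j:j + 2]
--         merged.append(chunk[0].upper() + chunk[1:])
--     return "".join(merged).replace(" ", " :wheelchair: ")
-- ===== Notes on version B (the rewrite author's own statement) =====
-- stated objective: alternative
-- what changed: B chunks the string into 2-character grams (range step 2 + slicing), uppercases each chunk's head, joins once, and performs the space substitution with a single whole-string str.replace, instead of A's two dependent character-by-character passes with repeated string concatenation.
import Mathlib
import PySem

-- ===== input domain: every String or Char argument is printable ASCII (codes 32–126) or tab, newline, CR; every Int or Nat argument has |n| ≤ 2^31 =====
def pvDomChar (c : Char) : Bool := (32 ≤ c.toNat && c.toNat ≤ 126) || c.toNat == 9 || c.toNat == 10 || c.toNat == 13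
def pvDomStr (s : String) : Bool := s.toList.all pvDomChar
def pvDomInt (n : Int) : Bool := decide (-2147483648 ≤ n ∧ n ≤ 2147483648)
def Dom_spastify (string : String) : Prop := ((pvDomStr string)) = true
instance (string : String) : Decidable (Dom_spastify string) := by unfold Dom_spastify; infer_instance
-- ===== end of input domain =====

-- B chunks the string into 2-grams, uppercases each chunk's head, joins once and does one
-- whole-string space replacement, instead of A's two dependent char-by-char passes; objective: alternative.

-- ===== PORT A =====
def spastify (string : String) : String :=
  let first : List Char :=
    (PySem.List.enumerate string.toList 0).foldl
      (fun acc p =>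
        if PySem.Int.mod p.1 2 == 0 then acc ++ [PySem.Chars.upperChar p.2] else acc ++ [p.2])
      []
  let spastified : List Char :=
    first.foldl
      (fun acc x =>
        if x == ' ' then acc ++ " :wheelchair: ".toList else acc ++ [x])
      []
  String.ofList spastified

-- ===== PORT B =====
def spastify_alt (string : String) : String :=
  let s : List Char := string.toList
  let merged : List Char :=
    (PySem.List.pyRange 0 (s.length : Int) 2).foldl
      (fun acc j =>
        let chunk := PySem.List.slice s (some j) (some (j + 2))
        acc ++ (match chunk with
                | [] => []                       -- unreachable: j < len(s), chunk is nonempty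
                | c :: rest => PySem.Chars.upperChar c :: rest))
      []
  String.ofList (PySem.Chars.replace merged [' '] " :wheelchair: ".toList)

-- ===== PRECONDITION & SPEC =====
def Spec_spastify (string : String) (out : String) : Prop := out = spastify_alt string
instance (string : String) (out : String) : Decidable (Spec_spastify string out) := by unfold Spec_spastify; infer_instance

-- ===== CLAIM (what is proved, stated in full; the proofs are below) =====
def Claim_equal_spastify : Prop := ∀ (string : String), Dom_spastify string → Spec_spastify string (spastify string)

-- ===== LEMMAS AND PROOFS =====

def pvCase (p : Int × Char) : Char :=
  if PySem.Int.mod p.1 2 == 0 then PySem.Chars.upperChar p.2 else p.2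

def pvPiece (c : Char) : List Char :=
  if c == ' ' then " :wheelchair: ".toList else [c]

-- the canonical case-mapped string, computed two characters at a time
def pvPairCase : List Char → List Char
  | [] => []
  | [a] => [PySem.Chars.upperChar a]
  | a :: b :: t => PySem.Chars.upperChar a :: b :: pvPairCase t

theorem pvEnum_pairCase (t : List Char) : ∀ (k : Nat),
    (PySem.List.enumerate t (2 * (k : Int))).map pvCase = pvPairCase t := by
  induction t using pvPairCase.induct with
  | case1 => intro k; simp [PySem.List.enumerate, pvPairCase]
  | case2 a =>
      intro k
      simp [PySem.List.enumerate, pvPairCase, pvCase]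
  | case3 a b t ih =>
      intro k
      have h2 : (2 * (k : Int)) + 1 + 1 = 2 * ((k + 1 : Nat) : Int) := by push_cast; ring
      simp only [PySem.List.enumerate, List.map_cons, h2, ih (k + 1), pvPairCase]
      simp [pvCase]

-- A's first loop produces the case-mapped string
theorem pvA_first (string : String) :
    (PySem.List.enumerate string.toList 0).foldl
      (fun acc p =>
        if PySem.Int.mod p.1 2 == 0 then acc ++ [PySem.Chars.upperChar p.2] else acc ++ [p.2])
      [] = pvPairCase string.toList := by
  have hc : ∀ (acc : List Char), ∀ p ∈ PySem.List.enumerate string.toList 0,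
      (if PySem.Int.mod p.1 2 == 0 then acc ++ [PySem.Chars.upperChar p.2] else acc ++ [p.2])
        = acc ++ [pvCase p] := by
    intro acc p _
    unfold pvCase
    by_cases h : (PySem.Int.mod p.1 2 == 0) = true
    · rw [if_pos h, if_pos h]
    · rw [if_neg h, if_neg h]
  rw [PySem.List.foldl_congr_mem _ _ (fun acc p => acc ++ [pvCase p]) _ hc,
    PySem.List.foldl_append_singleton_eq_map, List.nil_append]
  have := pvEnum_pairCase string.toList 0
  simpa using this

-- A's second loop is a flatMap of per-character pieces
theorem pvA_second (l : List Char) :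
    l.foldl (fun acc x =>
        if x == ' ' then acc ++ " :wheelchair: ".toList else acc ++ [x]) []
      = l.flatMap pvPiece := by
  have hc : ∀ (acc : List Char), ∀ x ∈ l,
      (if x == ' ' then acc ++ " :wheelchair: ".toList else acc ++ [x]) = acc ++ pvPiece x := by
    intro acc x _
    unfold pvPiece
    by_cases h : (x == ' ') = true
    · rw [if_pos h, if_pos h]
    · rw [if_neg h, if_neg h]
  rw [PySem.List.foldl_congr_mem _ _ (fun acc x => acc ++ pvPiece x) _ hc,
    PySem.List.foldl_append_eq_flatMap, List.nil_append]

-- pyRange with step 2 unfolds one element at a time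
theorem pvRange_two_cons (a b : Int) (h : a < b) :
    PySem.List.pyRange a b 2 = a :: PySem.List.pyRange (a + 2) b 2 := by
  rw [PySem.List.pyRange_of_pos a b (by norm_num),
    PySem.List.pyRange_of_pos (a + 2) b (by norm_num)]
  by_cases h2 : a + 2 < b
  · have hd : ((b - a + 2 - 1) / 2).toNat = ((b - (a + 2) + 2 - 1) / 2).toNat + 1 := by
      have : b - a + 2 - 1 = (b - (a + 2) + 2 - 1) + 1 * 2 := by ring
      rw [this, Int.add_mul_ediv_right _ _ (by norm_num)]
      have hge : 0 ≤ (b - (a + 2) + 2 - 1) / 2 := Int.ediv_nonneg (by omega) (by norm_num)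
      omega
    simp only [h, if_pos, h2, hd, List.range_succ_eq_map, List.map_cons, List.map_map]
    congr 1
    · simp
    · apply List.map_congr_left; intro k _; simp only [Function.comp_apply]; push_cast; ring
  · have hd : ((b - a + 2 - 1) / 2).toNat = 1 := by
      have h1 : b - a + 2 - 1 = b - a + 1 := by ring
      have hba : b - a = 1 ∨ b - a = 2 := by omega
      rcases hba with hba | hba <;> rw [h1, hba] <;> decide
    simp [h, h2, hd, List.range_succ_eq_map]

-- B's fold over the step-2 range produces the case-mapped string
theorem pvB_fold (s : List Char) : ∀ (t : List Char) (j : Nat) (acc : List Char),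
    t = s.drop j →
    (PySem.List.pyRange (j : Int) (s.length : Int) 2).foldl
      (fun acc j =>
        let chunk := PySem.List.slice s (some j) (some (j + 2))
        acc ++ (match chunk with
                | [] => []
                | c :: rest => PySem.Chars.upperChar c :: rest))
      acc = acc ++ pvPairCase t := by
  intro t
  induction t using pvPairCase.induct with
  | case1 =>
      intro j acc ht
      have hj : s.length ≤ j := by
        have := congrArg List.length ht; simp at this; omega
      have : ¬ ((j : Int) < (s.length : Int)) := by exact_mod_cast not_lt.mpr hj
      rw [PySem.List.pyRange_of_pos _ _ (by norm_num)]
      simp [this, pvPairCase]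
  | case2 a =>
      intro j acc ht
      have hj : j + 1 = s.length := by
        have := congrArg List.length ht; simp at this; omega
      have hlt : (j : Int) < (s.length : Int) := by exact_mod_cast (by omega : j < s.length)
      rw [pvRange_two_cons _ _ hlt, List.foldl_cons]
      have hchunk : PySem.List.slice s (some (j : Int)) (some ((j : Int) + 2)) = [a] := by
        have h2 : ((j : Int) + 2) = ((j : Int) + ((2 : Nat) : Int)) := by norm_num
        rw [h2, PySem.List.slice_natCast_add, ← ht]
        rfl
      have hend : ¬ ((j : Int) + 2 < (s.length : Int)) := by omega
      rw [PySem.List.pyRange_of_pos _ _ (by norm_num)]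
      simp [hchunk, hend, pvPairCase]
  | case3 a b t ih =>
      intro j acc ht
      have hj : j + 2 ≤ s.length := by
        have := congrArg List.length ht; simp at this; omega
      have hlt : (j : Int) < (s.length : Int) := by exact_mod_cast (by omega : j < s.length)
      rw [pvRange_two_cons _ _ hlt, List.foldl_cons]
      have hchunk : PySem.List.slice s (some (j : Int)) (some ((j : Int) + 2)) = [a, b] := by
        have h2 : ((j : Int) + 2) = ((j : Int) + ((2 : Nat) : Int)) := by norm_num
        rw [h2, PySem.List.slice_natCast_add, ← ht]
        rfl
      have ht' : b :: t = s.drop (j + 1) := by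
        have := congrArg (List.drop 1) ht; simpa [List.drop_drop] using this
      have ht'' : t = s.drop (j + 2) := by
        have := congrArg (List.drop 1) ht'; simpa [List.drop_drop] using this
      have hcast : ((j : Int) + 2) = (((j + 2 : Nat)) : Int) := by push_cast; ring
      rw [hchunk, hcast, ih (j + 2) _ ht'']
      simp [pvPairCase]

-- str.replace with a single-character pattern is a flatMap of per-character pieces
theorem pvReplace_go (fuel : Nat) : ∀ (l acc : List Char), l.length ≤ fuel →
    PySem.Chars.replace.go [' '] " :wheelchair: ".toList fuel l acc
      = acc.reverse ++ l.flatMap pvPiece := by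
  induction fuel with
  | zero =>
      intro l acc h
      have : l = [] := List.length_eq_zero_iff.mp (by omega)
      subst this; simp [PySem.Chars.replace.go]
  | succ fuel ih =>
      intro l acc h
      cases l with
      | nil => simp [PySem.Chars.replace.go]
      | cons c t =>
          by_cases hc : c = ' '
          · subst hc
            have hpre : List.isPrefixOf [' '] (' ' :: t) = true := by
              simp [List.isPrefixOf]
            rw [PySem.Chars.replace.go, if_pos hpre]
            simp only [List.length_cons] at h
            rw [ih _ _ (by simpa using Nat.le_of_succ_le_succ h)]
            simp [pvPiece]
          · have hpre : List.isPrefixOf [' '] (c :: t) = false := by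
              simp [List.isPrefixOf]; exact fun h => absurd h.symm hc
            rw [PySem.Chars.replace.go, if_neg (by simp [hpre])]
            simp only [List.length_cons] at h
            rw [ih _ _ (Nat.le_of_succ_le_succ h)]
            simp [pvPiece, hc]

theorem pvReplace (l : List Char) :
    PySem.Chars.replace l [' '] " :wheelchair: ".toList = l.flatMap pvPiece := by
  rw [PySem.Chars.replace]
  rw [if_neg (by simp)]
  exact pvReplace_go l.length l [] le_rfl

-- ===== VERDICT (by name: the statement is the Claim_ definition above) =====
theorem spastify_spec : Claim_equal_spastify := by
  intro s _
  unfold Spec_spastify spastify spastify_alt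
  have hb := pvB_fold s.toList s.toList 0 [] (by simp)
  simp only [Nat.cast_zero, List.nil_append] at hb
  simp only [pvA_first, pvA_second, pvReplace, hb]
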